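-- pv_equiv track=rewrite | github.com/amer1212a/elarn | ModalsDetection.py | OughtTo
-- ===== SOURCE A (Python) =====
-- def OughtTo(tagged):
--     res = []
--     for i in range(len(tagged)):
--         if str(tagged[i][0]).lower() in ["ought"]:
--             if i + 1 < len(tagged) and tagged[i + 1][1] in ["TO"]:
--                 res.append(str(tagged[i][0]) + " " + str(tagged[i + 1][0]))
--             if (
--                 i + 2 < len(tagged)
--                 and str(tagged[i + 1][0]).lower() in ["not", "n't"]
--                 and tagged[i + 2][1] in ["TO"]
--             ):
--                 res.append(
--                     str(tagged[i][0])
--                     + " "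
--                     + str(tagged[i + 1][0])
--                     + " "
--                     + str(tagged[i + 2][0])
--                 )
--     return res
-- ===== SOURCE B (Python) =====
-- def OughtTo(tagged):
--     # Single pass anchored on the "TO" tag, looking backward via two carried
--     # previous-token variables (no indexing).
--     res = []
--     p2 = p1 = None
--     for cur in tagged:
--         if cur[1] == "TO":
--             if (p2 is not None and str(p2[0]).lower() == "ought"
--                     and str(p1[0]).lower() in ("not", "n't")):
--                 res.append(str(p2[0]) + " " + str(p1[0]) + " " + str(cur[0]))
--             if p1 is not None and str(p1[0]).lower() == "ought":
--                 res.append(str(p1[0]) + " " + str(cur[0]))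
--         p2, p1 = p1, cur
--     return res
-- ===== Notes on version B (the rewrite author's own statement) =====
-- stated objective: alternative
-- what changed: B anchors the scan on the 'TO'-tagged token and looks backward through two carried previous-token variables instead of A's index loop anchored on 'ought' that peeks forward with i+1/i+2 bounds checks.
import Mathlib
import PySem

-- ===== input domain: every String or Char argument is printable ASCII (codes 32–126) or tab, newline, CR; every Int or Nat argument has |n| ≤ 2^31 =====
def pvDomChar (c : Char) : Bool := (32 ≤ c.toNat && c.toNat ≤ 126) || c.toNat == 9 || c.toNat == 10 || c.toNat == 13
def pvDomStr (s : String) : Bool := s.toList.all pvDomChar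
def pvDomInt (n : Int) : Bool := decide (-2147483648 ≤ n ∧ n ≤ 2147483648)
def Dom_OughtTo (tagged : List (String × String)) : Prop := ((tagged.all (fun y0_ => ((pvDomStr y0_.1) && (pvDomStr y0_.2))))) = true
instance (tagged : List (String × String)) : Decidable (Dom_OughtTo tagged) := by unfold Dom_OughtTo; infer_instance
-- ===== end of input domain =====

-- B replaces A's 'ought'-anchored index loop (forward peeks i+1/i+2) by a 'TO'-anchored
-- single pass that looks backward through two carried previous-token variables (objective: alternative).

-- ===== PORT A =====
-- str() on a value that is already a str is the identity, so it is dropped;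
-- indices are guarded (i < n, i+1 < n, i+2 < n) so pyGetD's default is never used.
def OughtTo (tagged : List (String × String)) : List String :=
  (PySem.List.pyRange 0 (tagged.length : Int) 1).foldl (fun res i =>
    let ti := PySem.List.pyGetD tagged i ("", "")
    if ["ought"].contains (PySem.Str.lower ti.1) then
      let res :=
        if i + 1 < (tagged.length : Int)
            && ["TO"].contains (PySem.List.pyGetD tagged (i + 1) ("", "")).2 then
          res ++ [ti.1 ++ " " ++ (PySem.List.pyGetD tagged (i + 1) ("", "")).1]
        else res
      if i + 2 < (tagged.length : Int)
          && ["not", "n't"].contains (PySem.Str.lower (PySem.List.pyGetD tagged (i + 1) ("", "")).1)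
          && ["TO"].contains (PySem.List.pyGetD tagged (i + 2) ("", "")).2 then
        res ++ [ti.1 ++ " " ++ (PySem.List.pyGetD tagged (i + 1) ("", "")).1 ++ " "
                  ++ (PySem.List.pyGetD tagged (i + 2) ("", "")).1]
      else res
    else res) []

-- ===== PORT B =====
-- loop body of Source B; in Python 'p2 is not None' implies p1 is not None (p1 is set before p2),
-- so the pattern 'some q, some r' is exact for Source B's first guard.
def OughtToAltStep (res : List String) (p2 p1 : Option (String × String))
    (cur : String × String) : List String :=
  if cur.2 == "TO" then
    let res :=
      match p2, p1 with
      | some q, some r =>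
        if PySem.Str.lower q.1 == "ought"
            && ["not", "n't"].contains (PySem.Str.lower r.1) then
          res ++ [q.1 ++ " " ++ r.1 ++ " " ++ cur.1]
        else res
      | _, _ => res
    match p1 with
    | some r => if PySem.Str.lower r.1 == "ought" then res ++ [r.1 ++ " " ++ cur.1] else res
    | none => res
  else res

def OughtToAltGo (res : List String) (p2 p1 : Option (String × String)) :
    List (String × String) → List String
  | [] => res
  | c :: rest => OughtToAltGo (OughtToAltStep res p2 p1 c) p1 (some c) rest

def OughtTo_alt (tagged : List (String × String)) : List String :=
  OughtToAltGo [] none none tagged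

-- ===== PRECONDITION & SPEC =====
def Spec_OughtTo (tagged : List (String × String)) (out : List String) : Prop := out = OughtTo_alt tagged
instance (tagged : List (String × String)) (out : List String) : Decidable (Spec_OughtTo tagged out) := by unfold Spec_OughtTo; infer_instance

-- ===== CLAIM (what is proved, stated in full; the proofs are below) =====
def Claim_equal_OughtTo : Prop := ∀ (tagged : List (String × String)), Dom_OughtTo tagged → Spec_OughtTo tagged (OughtTo tagged)

-- ===== LEMMAS AND PROOFS =====

-- the two-word emission 'r to', anchored at its "TO" token c with previous token r
def twoE (p1 : Option (String × String)) (c : String × String) : List String :=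
  if c.2 == "TO" then
    match p1 with
    | some r => if PySem.Str.lower r.1 == "ought" then [r.1 ++ " " ++ c.1] else []
    | none => []
  else []

-- the three-word emission 'q r to', anchored at its "TO" token c with previous tokens q, r
def threeE (p2 p1 : Option (String × String)) (c : String × String) : List String :=
  if c.2 == "TO" then
    match p2, p1 with
    | some q, some r =>
      if PySem.Str.lower q.1 == "ought"
          && ["not", "n't"].contains (PySem.Str.lower r.1) then
        [q.1 ++ " " ++ r.1 ++ " " ++ c.1]
      else []
    | _, _ => []
  else []

-- B, accumulator-free
def refGo (p2 p1 : Option (String × String)) : List (String × String) → List String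
  | [] => []
  | c :: rest => threeE p2 p1 c ++ twoE p1 c ++ refGo p1 (some c) rest

-- A, as structural recursion on suffixes (emissions grouped at the 'ought' position)
def refA : List (String × String) → List String
  | [] => []
  | c :: rest =>
    (match rest with | d :: _ => twoE (some c) d | [] => []) ++
    (match rest with | _ :: e :: _ => threeE (some c) (some rest.head!) e | _ => []) ++
    refA rest

theorem refA_cons (c : String × String) (rest : List (String × String)) :
    refA (c :: rest) =
      (match rest with | d :: _ => twoE (some c) d | [] => []) ++
      (match rest with | _ :: e :: _ => threeE (some c) (some rest.head!) e | _ => []) ++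
      refA rest := rfl

-- leading emissions of refGo coming from the virtual prefix (p2, p1)
def Hpre (p2 p1 : Option (String × String)) : List (String × String) → List String
  | [] => []
  | [c] => threeE p2 p1 c ++ twoE p1 c
  | c :: d :: _ => threeE p2 p1 c ++ twoE p1 c ++ threeE p1 (some c) d

theorem altStep_emit (res : List String) (p2 p1 : Option (String × String))
    (c : String × String) :
    OughtToAltStep res p2 p1 c = res ++ threeE p2 p1 c ++ twoE p1 c := by
  unfold OughtToAltStep threeE twoE
  cases p2 <;> cases p1 <;> split_ifs <;> simp_all <;> split_ifs <;> simp_all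

theorem altGo_eq_refGo (l : List (String × String)) :
    ∀ res p2 p1, OughtToAltGo res p2 p1 l = res ++ refGo p2 p1 l := by
  induction l with
  | nil => intro res p2 p1; simp [OughtToAltGo, refGo]
  | cons c rest ih =>
    intro res p2 p1
    simp [OughtToAltGo, refGo, altStep_emit, ih]

theorem refGo_eq (l : List (String × String)) :
    ∀ p2 p1, refGo p2 p1 l = Hpre p2 p1 l ++ refA l := by
  induction l with
  | nil => intro p2 p1; simp [refGo, Hpre, refA]
  | cons c rest ih =>
    intro p2 p1
    rw [show refGo p2 p1 (c :: rest) = threeE p2 p1 c ++ twoE p1 c ++ refGo p1 (some c) rest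
          from rfl, ih]
    match rest with
    | [] => simp [Hpre, refA]
    | [d] => simp [Hpre, refA]
    | d :: e :: r => simp [Hpre, refA_cons]

theorem Hpre_none_none (l : List (String × String)) : Hpre none none l = [] := by
  match l with
  | [] => rfl
  | [c] => simp [Hpre, threeE, twoE]
  | c :: d :: r => simp [Hpre, threeE, twoE]

theorem alt_eq_refGo (tagged : List (String × String)) :
    OughtTo_alt tagged = refGo none none tagged := by
  simp [OughtTo_alt, altGo_eq_refGo]

theorem alt_eq_refA (tagged : List (String × String)) :
    OughtTo_alt tagged = refA tagged := by
  rw [alt_eq_refGo, refGo_eq, Hpre_none_none, List.nil_append]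

-- A's per-index emission
def emitA (tagged : List (String × String)) (i : Int) : List String :=
  let ti := PySem.List.pyGetD tagged i ("", "")
  if ["ought"].contains (PySem.Str.lower ti.1) then
    (if i + 1 < (tagged.length : Int)
         && ["TO"].contains (PySem.List.pyGetD tagged (i + 1) ("", "")).2 then
       [ti.1 ++ " " ++ (PySem.List.pyGetD tagged (i + 1) ("", "")).1]
     else []) ++
    (if i + 2 < (tagged.length : Int)
         && ["not", "n't"].contains (PySem.Str.lower (PySem.List.pyGetD tagged (i + 1) ("", "")).1)
         && ["TO"].contains (PySem.List.pyGetD tagged (i + 2) ("", "")).2 then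
       [ti.1 ++ " " ++ (PySem.List.pyGetD tagged (i + 1) ("", "")).1 ++ " "
          ++ (PySem.List.pyGetD tagged (i + 2) ("", "")).1]
     else [])
  else []

theorem A_eq_flatMap (tagged : List (String × String)) :
    OughtTo tagged = (PySem.List.pyRange 0 (tagged.length : Int) 1).flatMap (emitA tagged) := by
  unfold OughtTo
  rw [show (fun (res : List String) (i : Int) =>
        let ti := PySem.List.pyGetD tagged i ("", "")
        if ["ought"].contains (PySem.Str.lower ti.1) then
          let res :=
            if i + 1 < (tagged.length : Int)
                && ["TO"].contains (PySem.List.pyGetD tagged (i + 1) ("", "")).2 then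
              res ++ [ti.1 ++ " " ++ (PySem.List.pyGetD tagged (i + 1) ("", "")).1]
            else res
          if i + 2 < (tagged.length : Int)
              && ["not", "n't"].contains (PySem.Str.lower (PySem.List.pyGetD tagged (i + 1) ("", "")).1)
              && ["TO"].contains (PySem.List.pyGetD tagged (i + 2) ("", "")).2 then
            res ++ [ti.1 ++ " " ++ (PySem.List.pyGetD tagged (i + 1) ("", "")).1 ++ " "
                      ++ (PySem.List.pyGetD tagged (i + 2) ("", "")).1]
          else res
        else res)
      = fun res i => res ++ emitA tagged i from ?_]
  · exact PySem.List.foldl_append_eq_flatMap (emitA tagged) _ _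
  · funext res i
    simp only [emitA]
    split_ifs <;> simp_all
 
theorem emitA_step (tagged : List (String × String)) (k : Nat) (hk : k < tagged.length) :
    emitA tagged (k : Int) ++ refA (tagged.drop (k + 1)) = refA (tagged.drop k) := by
  have e1 : ((k : Int) + 1) = ((k + 1 : Nat) : Int) := by push_cast; ring
  have e2 : ((k : Int) + 2) = ((k + 2 : Nat) : Int) := by push_cast; ring
  rw [List.drop_eq_getElem_cons hk]
  by_cases h1 : k + 1 < tagged.length
  · rw [List.drop_eq_getElem_cons h1]
    by_cases h2 : k + 2 < tagged.length
    · rw [List.drop_eq_getElem_cons h2]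
      simp only [emitA, e1, e2, PySem.List.pyGetD_natCast, Nat.cast_lt, refA_cons,
        List.getD_eq_getElem _ _ hk, List.getD_eq_getElem _ _ h1, List.getD_eq_getElem _ _ h2,
        h1, h2, decide_true, Bool.true_and, List.head!, twoE, threeE]
      by_cases hO : PySem.Str.lower tagged[k].1 = "ought" <;>
        by_cases hT1 : tagged[k + 1].2 = "TO" <;>
          by_cases hN : (["not", "n't"].contains (PySem.Str.lower tagged[k + 1].1)) = true <;>
            by_cases hT2 : tagged[k + 2].2 = "TO" <;>
              simp_all
    · have hd : tagged.drop (k + 2) = [] := List.drop_eq_nil_of_le (by omega)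
      rw [hd]
      simp only [emitA, e1, e2, PySem.List.pyGetD_natCast, Nat.cast_lt, refA_cons,
        List.getD_eq_getElem _ _ hk, List.getD_eq_getElem _ _ h1,
        h1, h2, decide_true, decide_false, Bool.true_and, Bool.false_and, twoE]
      by_cases hO : PySem.Str.lower tagged[k].1 = "ought" <;>
        by_cases hT1 : tagged[k + 1].2 = "TO" <;> simp_all [refA]
  · have hd : tagged.drop (k + 1) = [] := List.drop_eq_nil_of_le (by omega)
    have h2 : ¬ k + 2 < tagged.length := by omega
    rw [hd]
    simp only [emitA, e1, e2, PySem.List.pyGetD_natCast, Nat.cast_lt,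
      List.getD_eq_getElem _ _ hk, h1, h2, decide_false, Bool.false_and]
    simp [refA]

theorem flatMap_emitA_eq_refA (tagged : List (String × String)) : ∀ k : Nat,
    (PySem.List.pyRange (k : Int) (tagged.length : Int) 1).flatMap (emitA tagged)
      = refA (tagged.drop k) := by
  have main : ∀ m k : Nat, tagged.length - k ≤ m →
      (PySem.List.pyRange (k : Int) (tagged.length : Int) 1).flatMap (emitA tagged)
        = refA (tagged.drop k) := by
    intro m
    induction m with
    | zero =>
      intro k hk
      have hle : tagged.length ≤ k := by omega
      rw [PySem.List.pyRange_one_eq_nil (by exact_mod_cast hle),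
        List.drop_eq_nil_of_le hle]
      rfl
    | succ m ih =>
      intro k hk
      by_cases h : k < tagged.length
      · rw [PySem.List.pyRange_one_cons (by exact_mod_cast h), List.flatMap_cons,
          show ((k : Int) + 1) = ((k + 1 : Nat) : Int) from by push_cast; ring,
          ih (k + 1) (by omega)]
        exact emitA_step tagged k h
      · have hle : tagged.length ≤ k := by omega
        rw [PySem.List.pyRange_one_eq_nil (by exact_mod_cast hle),
          List.drop_eq_nil_of_le hle]
        rfl
  exact fun k => main (tagged.length - k) k le_rfl

theorem A_eq_refA (tagged : List (String × String)) : OughtTo tagged = refA tagged := by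
  have h := flatMap_emitA_eq_refA tagged 0
  simpa [A_eq_flatMap] using h

-- ===== VERDICT (by name: the statement is the Claim_ definition above) =====
theorem OughtTo_spec : Claim_equal_OughtTo := by
  intro tagged _
  unfold Spec_OughtTo
  rw [A_eq_refA, alt_eq_refA]
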